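-- pv_equiv track=rewrite | github.com/sarth-diskalkar/BIOL7200-Programming-for-Bioinformatics | Exercises and Projects/Week07/q1_solution.py | calc_dims
-- ===== SOURCE A (Python) =====
-- def calc_dims(height: int) -> list[int]:
--     """Given a triangle height, calculate the number of units height per line
--
--     Args:
--         height:
--             The number of lines tall that the triangle will be
--
--     returns:
--         The number of characters per line for the triangle
--     """
--     midpoint = -(-height//2) # round up
--     dims = [i for i in range(1, midpoint + 1)]
--     if height % 2 == 0: # even
--         dims += dims[::-1]
--     else: # odd
--         dims += dims[-2::-1]
--     return dims
-- ===== SOURCE B (Python) =====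
-- def calc_dims(height: int) -> list[int]:
--     """Characters per line for a triangle of the given height."""
--     return [min(i + 1, height - i) for i in range(height)]
-- ===== Notes on version B (the rewrite author's own statement) =====
-- stated objective: simpler
-- what changed: Replaces the build-first-half-then-mirror construction (ceil midpoint, range, reversed slice, even/odd branch) with a single comprehension computing each line width directly as the minimum of i plus one and height minus i.
import Mathlib
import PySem

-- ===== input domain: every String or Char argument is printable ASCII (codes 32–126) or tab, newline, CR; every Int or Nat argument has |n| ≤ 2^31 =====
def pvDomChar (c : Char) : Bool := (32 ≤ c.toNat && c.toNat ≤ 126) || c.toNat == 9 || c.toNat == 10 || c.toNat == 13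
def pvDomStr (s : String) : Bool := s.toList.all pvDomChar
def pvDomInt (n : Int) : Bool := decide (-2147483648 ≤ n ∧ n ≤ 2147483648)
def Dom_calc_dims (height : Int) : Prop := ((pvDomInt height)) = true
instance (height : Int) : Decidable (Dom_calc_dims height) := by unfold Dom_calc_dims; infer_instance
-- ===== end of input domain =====

-- B replaces A's build-first-half-then-mirror construction with one comprehension using the
-- closed-form per-line width min(i+1, height-i); objective: simpler.

-- ===== PORT A =====
def calc_dims (height : Int) : List Int :=
  let midpoint : Int := -(PySem.Int.floordiv (-height) 2)        -- round up
  let dims : List Int := PySem.List.pyRange 1 (midpoint + 1) 1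
  if PySem.Int.mod height 2 = 0 then                             -- even
    dims ++ (PySem.List.slice? dims none none (-1)).getD []      -- dims[::-1] (never none: step ≠ 0)
  else                                                           -- odd
    dims ++ (PySem.List.slice? dims (some (-2)) none (-1)).getD []  -- dims[-2::-1] (never none: step ≠ 0)

-- ===== PORT B =====
def calc_dims_alt (height : Int) : List Int :=
  (PySem.List.pyRange 0 height 1).map (fun i => min (i + 1) (height - i))

-- ===== PRECONDITION & SPEC =====
def Spec_calc_dims (height : Int) (out : List Int) : Prop := out = calc_dims_alt height
instance (height : Int) (out : List Int) : Decidable (Spec_calc_dims height out) := by unfold Spec_calc_dims; infer_instance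

-- ===== CLAIM (what is proved, stated in full; the proofs are below) =====
def Claim_equal_calc_dims : Prop := ∀ (height : Int), Dom_calc_dims height → Spec_calc_dims height (calc_dims height)

-- ===== LEMMAS AND PROOFS =====

-- xs[-2::-1] in Python reads the list backwards starting one before the last element,
-- i.e. it is the reverse of xs with its last element dropped.
theorem slice_neg2_rev {α : Type} (xs : List α) :
    PySem.List.slice? xs (some (-2)) none (-1) = some xs.dropLast.reverse := by
  induction xs using List.reverseRecOn with
  | nil => simp [PySem.List.slice?, PySem.List.sliceIndices]
  | append_singleton ys z _ =>
    simp [PySem.List.slice?, PySem.List.sliceIndices]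
    rcases Nat.eq_zero_or_pos ys.length with h0 | hpos
    · simp [List.length_eq_zero_iff.mp h0]
    · rw [if_pos hpos]
      have hcnt : (-2 + ((ys.length : Int) + 1) + 1).toNat = ys.length := by omega
      rw [hcnt]
      have hfun : ∀ x ∈ List.range ys.length,
          (ys ++ [z])[(-2 + ((ys.length : Int) + 1) + -(x : Int)).toNat]? =
            (some ∘ fun x => ys.getD (ys.length - 1 - x) z) x := by
        intro x hx
        simp only [List.mem_range] at hx
        have hidx : (-2 + ((ys.length : Int) + 1) + -(x : Int)).toNat = ys.length - 1 - x := by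
          omega
        rw [hidx, List.getElem?_append_left (by omega),
          List.getElem?_eq_getElem (by omega)]
        simp only [Function.comp_apply, List.getD_eq_getElem?_getD]
        rw [List.getElem?_eq_getElem (show ys.length - 1 - x < ys.length by omega)]
        rfl
      rw [List.filterMap_congr hfun, List.filterMap_eq_map]
      apply List.ext_getElem (by simp)
      intro i h1 h2
      simp only [List.getElem_map, List.getElem_range, List.getElem_reverse]
      simp only [List.getD_eq_getElem?_getD]
      rw [List.getElem?_eq_getElem (show ys.length - 1 - i < ys.length by simp at h1; omega)]
      rfl

theorem calc_dims_eq (h : Int) : calc_dims h = calc_dims_alt h := by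
  have hfd : PySem.Int.floordiv (-h) 2 = (-h) / 2 := by
    simp [PySem.Int.floordiv, Int.fdiv_eq_ediv]
  have hmod : PySem.Int.mod h 2 = h % 2 := by
    simp [PySem.Int.mod, Int.fmod_eq_emod]
  unfold calc_dims calc_dims_alt
  simp only [hfd, hmod, PySem.List.slice?_none_none_neg_one, slice_neg2_rev,
    Option.getD_some, PySem.List.pyRange_one 1, PySem.List.pyRange_one 0]
  set m : Int := -(-h / 2) with hm
  have hm1 : m + 1 - 1 = m := by ring
  rw [hm1]
  by_cases hpos : 0 < h
  case neg =>
    have hle : h ≤ 0 := by omega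
    have h1 : m.toNat = 0 := by omega
    split_ifs <;> simp [h1] <;> omega
  case pos =>
    have hmt : ((m.toNat : Int)) = m := by omega
    have hnt : (((h - 0).toNat : Int)) = h := by omega
    split_ifs with hev
    · -- even: h = 2 * m
      have h2m : 2 * m = h := by omega
      apply List.ext_getElem
      · simp; omega
      · intro i hA hB
        simp only [List.length_append, List.length_map, List.length_reverse,
          List.length_range] at hA
        simp only [List.length_map, List.length_range] at hB
        rw [List.getElem_append]
        simp only [List.getElem_map, List.getElem_range, List.length_map,
          List.length_range, List.getElem_reverse]
        split_ifs with hi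
        · omega
        · omega
    · -- odd: h = 2 * m - 1
      have h2m : 2 * m - 1 = h := by omega
      apply List.ext_getElem
      · simp; omega
      · intro i hA hB
        simp only [List.length_append, List.length_map, List.length_reverse,
          List.length_dropLast, List.length_range] at hA
        simp only [List.length_map, List.length_range] at hB
        rw [List.getElem_append]
        simp only [List.getElem_map, List.getElem_range, List.length_map,
          List.length_range, List.getElem_reverse, List.getElem_dropLast,
          List.length_dropLast]
        split_ifs with hi
        · omega
        · omega

-- ===== VERDICT (by name: the statement is the Claim_ definition above) =====
theorem calc_dims_spec : Claim_equal_calc_dims := by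
  intro h _
  exact calc_dims_eq h
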